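-- pv_equiv track=rewrite | github.com/Neutron-Fox/MailMergeSender | mail_merge_sender.py | suggest_mappings
-- ===== SOURCE A (Python) =====
-- from typing import List, Dict, Any
--
-- def suggest_mappings(placeholders: List[str], headers: List[str]) -> Dict[str, str]:
--     suggestions = {}
--     for placeholder in placeholders:
--         placeholder = placeholder.strip('{}').upper()
--         best_match = None
--         best_score = 0
--         for header in headers:
--             header = header.upper()
--             if placeholder == header:
--                 best_match = header
--                 best_score = 100
--                 break
--             if placeholder in header or header in placeholder:
--                 score = 80
--                 if score > best_score:
--                     best_match = header
--                     best_score = score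
--             common_mappings = {
--                 ('NAME', 'FULLNAME', 'FULL_NAME'): ('NAME', 'PERSON', 'USER'),
--                 ('EMAIL', 'MAIL', 'E_MAIL'): ('EMAIL', 'MAIL', '@')
--             }
--             for placeholder_group, header_keywords in common_mappings.items():
--                 if placeholder in placeholder_group:
--                     if any(keyword in header for keyword in header_keywords):
--                         if 60 > best_score:
--                             best_match = header
--                             best_score = 60
--         if best_match:
--             suggestions[placeholder] = best_match
--     return suggestions
-- ===== SOURCE B (Python) =====
-- from typing import List, Dict
--
-- # common-mappings table hoisted to module level: normalized placeholder -> header keywords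
-- _COMMON = {
--     ('NAME', 'FULLNAME', 'FULL_NAME'): ('NAME', 'PERSON', 'USER'),
--     ('EMAIL', 'MAIL', 'E_MAIL'): ('EMAIL', 'MAIL', '@'),
-- }
--
-- def _find_match(p, ups):
--     # tier 1: exact equality
--     for h in ups:
--         if h == p:
--             return h
--     # tier 2: bidirectional substring containment
--     for h in ups:
--         if p in h or h in p:
--             return h
--     # tier 3: common-mappings keyword groups
--     for group, keywords in _COMMON.items():
--         if p in group:
--             for h in ups:
--                 if any(k in h for k in keywords):
--                     return h
--     return None
--
-- def suggest_mappings(placeholders: List[str], headers: List[str]) -> Dict[str, str]: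
--     ups = [h.upper() for h in headers]
--     suggestions = {}
--     for placeholder in placeholders:
--         p = placeholder.strip('{}').upper()
--         m = _find_match(p, ups)
--         if m:
--             suggestions[p] = m
--     return suggestions
-- ===== Notes on version B (the rewrite author's own statement) =====
-- stated objective: faster
-- what changed: Replaced the single scoring loop carrying (best_match, best_score) with a score-free tiered search: headers are uppercased once up front, then three successive first-match scans (equality, bidirectional substring, common-mapping keywords), with the common_mappings dict hoisted to module level instead of being rebuilt inside the inner loop.
import Mathlib
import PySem

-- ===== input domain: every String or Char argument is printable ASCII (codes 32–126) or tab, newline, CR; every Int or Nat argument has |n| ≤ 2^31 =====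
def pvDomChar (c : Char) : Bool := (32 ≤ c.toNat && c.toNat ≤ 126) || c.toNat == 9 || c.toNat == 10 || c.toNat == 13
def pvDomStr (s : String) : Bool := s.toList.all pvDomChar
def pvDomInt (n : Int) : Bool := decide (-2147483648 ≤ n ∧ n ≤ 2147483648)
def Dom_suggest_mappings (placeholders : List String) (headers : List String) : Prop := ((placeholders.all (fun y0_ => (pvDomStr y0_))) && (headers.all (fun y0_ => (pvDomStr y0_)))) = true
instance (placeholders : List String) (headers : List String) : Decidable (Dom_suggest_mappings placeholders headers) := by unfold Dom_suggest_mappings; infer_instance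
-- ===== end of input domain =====

-- B replaces the scored single pass with tiered first-match scans over once-uppercased headers, hoisting the per-iteration common_mappings dict to module level (measurably faster by constant factor).


-- ===== PORT A =====
-- the common_mappings literal (the dict A re-creates each iteration): two (group, keywords) items, in order
def pvGroup1 : List String := ["NAME", "FULLNAME", "FULL_NAME"]
def pvKws1 : List String := ["NAME", "PERSON", "USER"]
def pvGroup2 : List String := ["EMAIL", "MAIL", "E_MAIL"]
def pvKws2 : List String := ["EMAIL", "MAIL", "@"]

-- inner 'for header in headers' loop of A, state = (best_match, best_score); 'break' on equality returns at once
def pvInnerA (p : String) : Option String × Int → List String → Option String × Int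
  | st, [] => st
  | (bm, bs), h :: rest =>
    let H := PySem.Str.upper h
    if p = H then (some H, 100)
    else
      let s1 := if PySem.Str.isIn p H || PySem.Str.isIn H p then
                  (if (80 : Int) > bs then (some H, (80 : Int)) else (bm, bs))
                else (bm, bs)
      let s2 := if decide (p ∈ pvGroup1) && pvKws1.any (fun k => PySem.Str.isIn k H) then
                  (if (60 : Int) > s1.2 then (some H, (60 : Int)) else s1)
                else s1
      let s3 := if decide (p ∈ pvGroup2) && pvKws2.any (fun k => PySem.Str.isIn k H) then
                  (if (60 : Int) > s2.2 then (some H, (60 : Int)) else s2)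
                else s2
      pvInnerA p s3 rest

def suggest_mappings (placeholders : List String) (headers : List String) : List (String × String) :=
  (placeholders.foldl (fun suggestions placeholder =>
      let p := PySem.Str.upper (PySem.Str.stripChars placeholder "{}")
      let st := pvInnerA p (none, 0) headers
      match st.1 with
      | some m => if m ≠ "" then suggestions.insert p m else suggestions  -- 'if best_match:' (None and "" falsy)
      | none => suggestions)
    PySem.Dict.empty).items

-- ===== PORT B =====
-- Source B's _find_match: three successive first-match scans over the pre-uppercased headers
def pvAltFind (p : String) (ups : List String) : Option String :=
  match ups.find? (fun h => h == p) with
  | some h => some h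
  | none =>
    match ups.find? (fun h => PySem.Str.isIn p h || PySem.Str.isIn h p) with
    | some h => some h
    | none =>
      if decide (p ∈ pvGroup1) then ups.find? (fun h => pvKws1.any (fun k => PySem.Str.isIn k h))
      else if decide (p ∈ pvGroup2) then ups.find? (fun h => pvKws2.any (fun k => PySem.Str.isIn k h))
      else none

def suggest_mappings_alt (placeholders : List String) (headers : List String) : List (String × String) :=
  let ups := headers.map PySem.Str.upper
  (placeholders.foldl (fun suggestions placeholder =>
      let p := PySem.Str.upper (PySem.Str.stripChars placeholder "{}")
      match pvAltFind p ups with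
      | some m => if m ≠ "" then suggestions.insert p m else suggestions  -- 'if m:'
      | none => suggestions)
    PySem.Dict.empty).items

-- ===== PRECONDITION & SPEC =====
def Spec_suggest_mappings (placeholders : List String) (headers : List String) (out : List (String × String)) : Prop := out = suggest_mappings_alt placeholders headers
instance (placeholders : List String) (headers : List String) (out : List (String × String)) : Decidable (Spec_suggest_mappings placeholders headers out) := by unfold Spec_suggest_mappings; infer_instance

-- ===== CLAIM (what is proved, stated in full; the proofs are below) =====
def Claim_equal_suggest_mappings : Prop := ∀ (placeholders : List String) (headers : List String), Dom_suggest_mappings placeholders headers → Spec_suggest_mappings placeholders headers (suggest_mappings placeholders headers)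

-- ===== LEMMAS AND PROOFS =====

-- the three tiers of the search, as first-match scans over the RAW header list (upper applied inside the predicate)
def pvTE (p : String) (hs : List String) : Option String := hs.find? (fun h => PySem.Str.upper h == p)
def pvTS (p : String) (hs : List String) : Option String := hs.find? (fun h => PySem.Str.isIn p (PySem.Str.upper h) || PySem.Str.isIn (PySem.Str.upper h) p)
def pvTK1 (p : String) (hs : List String) : Option String := hs.find? (fun h => pvKws1.any (fun k => PySem.Str.isIn k (PySem.Str.upper h)))
def pvTK2 (p : String) (hs : List String) : Option String := hs.find? (fun h => pvKws2.any (fun k => PySem.Str.isIn k (PySem.Str.upper h)))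

-- the tiered result both programs compute
def pvTier (p : String) (hs : List String) : Option String :=
  match pvTE p hs with
  | some h => some (PySem.Str.upper h)
  | none =>
    match pvTS p hs with
    | some h => some (PySem.Str.upper h)
    | none =>
      if p ∈ pvGroup1 then (pvTK1 p hs).map PySem.Str.upper
      else if p ∈ pvGroup2 then (pvTK2 p hs).map PySem.Str.upper
      else none

-- the two groups of common_mappings are disjoint
lemma pv_not_both (p : String) (h1 : p ∈ pvGroup1) (h2 : p ∈ pvGroup2) : False := by
  simp only [pvGroup1, List.mem_cons, List.not_mem_nil, or_false] at h1
  rcases h1 with h | h | h <;> subst h <;> revert h2 <;> decide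

-- B's search over the pre-uppercased headers is the tiered result
lemma pv_alt_eq (p : String) (hs : List String) :
    pvAltFind p (hs.map PySem.Str.upper) = pvTier p hs := by
  simp only [pvAltFind, pvTier, pvTE, pvTS, pvTK1, pvTK2, List.find?_map, Function.comp_def,
    decide_eq_true_eq]
  cases hE : hs.find? (fun h => PySem.Str.upper h == p) with
  | some h => simp [hE]
  | none =>
    simp only [hE, Option.map_none]
    cases hS : hs.find? (fun h => PySem.Str.isIn p (PySem.Str.upper h) || PySem.Str.isIn (PySem.Str.upper h) p) with
    | some h => simp [hS]
    | none => simp [hS]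

-- running A's loop from a score-80 state: only an exact equality can still change the state
lemma pv_run80 (p : String) (bm : Option String) (hs : List String) :
    pvInnerA p (bm, 80) hs =
      match pvTE p hs with
      | some h => (some (PySem.Str.upper h), 100)
      | none => (bm, 80) := by
  induction hs with
  | nil => simp [pvInnerA, pvTE]
  | cons h t ih =>
    by_cases hbe : (PySem.Str.upper h == p) = true
    · have hp : p = PySem.Str.upper h := ((beq_iff_eq).mp hbe).symm
      have hE : pvTE p (h :: t) = some h := by
        simp only [pvTE, List.find?_cons, hbe]
      simp only [hE, pvInnerA, if_pos hp]
    · have hp : ¬ p = PySem.Str.upper h := fun e => hbe (by simp [e])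
      have hbf : (PySem.Str.upper h == p) = false := by
        rw [← Bool.not_eq_true]; exact hbe
      have hE : pvTE p (h :: t) = pvTE p t := by
        simp only [pvTE, List.find?_cons, hbf]
      rw [hE]
      simp only [pvInnerA, if_neg hp]
      rw [if_neg (show ¬ ((80 : Int) > (bm, (80 : Int)).2) by norm_num), ite_self,
        if_neg (show ¬ ((60 : Int) > (bm, (80 : Int)).2) by norm_num), ite_self,
        if_neg (show ¬ ((60 : Int) > (bm, (80 : Int)).2) by norm_num), ite_self]
      exact ih

-- running A's loop from a score-60 state: equality, then a substring match (which upgrades to 80)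
lemma pv_run60 (p : String) (bm : Option String) (hs : List String) :
    pvInnerA p (bm, 60) hs =
      match pvTE p hs with
      | some h => (some (PySem.Str.upper h), 100)
      | none =>
        match pvTS p hs with
        | some h => (some (PySem.Str.upper h), 80)
        | none => (bm, 60) := by
  induction hs with
  | nil => simp [pvInnerA, pvTE, pvTS]
  | cons h t ih =>
    by_cases hbe : (PySem.Str.upper h == p) = true
    · have hp : p = PySem.Str.upper h := ((beq_iff_eq).mp hbe).symm
      have hE : pvTE p (h :: t) = some h := by
        simp only [pvTE, List.find?_cons, hbe]
      simp only [hE, pvInnerA, if_pos hp]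
    · have hp : ¬ p = PySem.Str.upper h := fun e => hbe (by simp [e])
      have hbf : (PySem.Str.upper h == p) = false := by
        rw [← Bool.not_eq_true]; exact hbe
      have hE : pvTE p (h :: t) = pvTE p t := by
        simp only [pvTE, List.find?_cons, hbf]
      rw [hE]
      by_cases hsub : (PySem.Str.isIn p (PySem.Str.upper h) || PySem.Str.isIn (PySem.Str.upper h) p) = true
      · have hS : pvTS p (h :: t) = some h := by
          simp only [pvTS, List.find?_cons, hsub]
        rw [hS]
        simp only [pvInnerA, if_neg hp]
        rw [if_pos hsub, if_pos (show (80 : Int) > (bm, (60 : Int)).2 by norm_num),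
          if_neg (show ¬ ((60 : Int) > (some (PySem.Str.upper h), (80 : Int)).2) by norm_num), ite_self,
          if_neg (show ¬ ((60 : Int) > (some (PySem.Str.upper h), (80 : Int)).2) by norm_num), ite_self]
        rw [pv_run80]
      · have hsf : (PySem.Str.isIn p (PySem.Str.upper h) || PySem.Str.isIn (PySem.Str.upper h) p) = false := by
          rw [← Bool.not_eq_true]; exact hsub
        have hS : pvTS p (h :: t) = pvTS p t := by
          simp only [pvTS, List.find?_cons, hsf]
        rw [hS]
        simp only [pvInnerA, if_neg hp]
        rw [if_neg hsub,
          if_neg (show ¬ ((60 : Int) > (bm, (60 : Int)).2) by norm_num), ite_self,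
          if_neg (show ¬ ((60 : Int) > (bm, (60 : Int)).2) by norm_num), ite_self]
        exact ih

-- the full inner loop from the initial state computes the tiered result (first component)
lemma pv_key (p : String) (hs : List String) :
    (pvInnerA p (none, 0) hs).1 = pvTier p hs := by
  induction hs with
  | nil => simp [pvInnerA, pvTier, pvTE, pvTS, pvTK1, pvTK2]
  | cons h t ih =>
    by_cases hbe : (PySem.Str.upper h == p) = true
    · have hp : p = PySem.Str.upper h := ((beq_iff_eq).mp hbe).symm
      have hE : pvTE p (h :: t) = some h := by
        simp only [pvTE, List.find?_cons, hbe]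
      simp only [pvTier, hE, pvInnerA, if_pos hp]
    · have hp : ¬ p = PySem.Str.upper h := fun e => hbe (by simp [e])
      have hbf : (PySem.Str.upper h == p) = false := by
        rw [← Bool.not_eq_true]; exact hbe
      have hE : pvTE p (h :: t) = pvTE p t := by
        simp only [pvTE, List.find?_cons, hbf]
      by_cases hsub : (PySem.Str.isIn p (PySem.Str.upper h) || PySem.Str.isIn (PySem.Str.upper h) p) = true
      · have hS : pvTS p (h :: t) = some h := by
          simp only [pvTS, List.find?_cons, hsub]
        simp only [pvTier, hE, hS, pvInnerA, if_neg hp]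
        rw [if_pos hsub, if_pos (show (80 : Int) > ((none : Option String), (0 : Int)).2 by norm_num),
          if_neg (show ¬ ((60 : Int) > (some (PySem.Str.upper h), (80 : Int)).2) by norm_num), ite_self,
          if_neg (show ¬ ((60 : Int) > (some (PySem.Str.upper h), (80 : Int)).2) by norm_num), ite_self]
        rw [pv_run80]
        cases hE2 : pvTE p t <;> rfl
      · have hsf : (PySem.Str.isIn p (PySem.Str.upper h) || PySem.Str.isIn (PySem.Str.upper h) p) = false := by
          rw [← Bool.not_eq_true]; exact hsub
        have hS : pvTS p (h :: t) = pvTS p t := by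
          simp only [pvTS, List.find?_cons, hsf]
        by_cases hany1 : (pvKws1.any (fun k => PySem.Str.isIn k (PySem.Str.upper h))) = true
        · by_cases hg1 : p ∈ pvGroup1
          · -- group-1 keyword step fires at this header
            have hg2 : ¬ p ∈ pvGroup2 := fun h2 => pv_not_both p hg1 h2
            have hK1 : pvTK1 p (h :: t) = some h := by
              simp only [pvTK1, List.find?_cons, hany1]
            have hk1 : (decide (p ∈ pvGroup1) && pvKws1.any (fun k => PySem.Str.isIn k (PySem.Str.upper h))) = true := by
              rw [hany1]; simp [hg1]
            have hk2 : ¬ ((decide (p ∈ pvGroup2) && pvKws2.any (fun k => PySem.Str.isIn k (PySem.Str.upper h))) = true) := by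
              simp [hg2]
            simp only [pvTier, hE, hS, hK1, if_pos hg1, pvInnerA, if_neg hp]
            rw [if_neg hsub, if_pos hk1,
              if_pos (show (60 : Int) > ((none : Option String), (0 : Int)).2 by norm_num),
              if_neg hk2]
            rw [pv_run60]
            cases hE2 : pvTE p t <;> cases hS2 : pvTS p t <;> rfl
          · -- keywords match but p is in neither group (or only group 2 matters below)
            by_cases hg2 : p ∈ pvGroup2
            · by_cases hany2 : (pvKws2.any (fun k => PySem.Str.isIn k (PySem.Str.upper h))) = true
              · have hK2 : pvTK2 p (h :: t) = some h := by
                  simp only [pvTK2, List.find?_cons, hany2]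
                have hk1 : ¬ ((decide (p ∈ pvGroup1) && pvKws1.any (fun k => PySem.Str.isIn k (PySem.Str.upper h))) = true) := by
                  simp [hg1]
                have hk2 : (decide (p ∈ pvGroup2) && pvKws2.any (fun k => PySem.Str.isIn k (PySem.Str.upper h))) = true := by
                  rw [hany2]; simp [hg2]
                simp only [pvTier, hE, hS, hK2, if_neg hg1, if_pos hg2, pvInnerA, if_neg hp]
                rw [if_neg hsub, if_neg hk1, if_pos hk2,
                  if_pos (show (60 : Int) > ((none : Option String), (0 : Int)).2 by norm_num)]
                rw [pv_run60]
                cases hE2 : pvTE p t <;> cases hS2 : pvTS p t <;> rfl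
              · have haf2 : (pvKws2.any (fun k => PySem.Str.isIn k (PySem.Str.upper h))) = false := by
                  rw [← Bool.not_eq_true]; exact hany2
                have hK2 : pvTK2 p (h :: t) = pvTK2 p t := by
                  simp only [pvTK2, List.find?_cons, haf2]
                have hk1 : ¬ ((decide (p ∈ pvGroup1) && pvKws1.any (fun k => PySem.Str.isIn k (PySem.Str.upper h))) = true) := by
                  simp [hg1]
                have hk2 : ¬ ((decide (p ∈ pvGroup2) && pvKws2.any (fun k => PySem.Str.isIn k (PySem.Str.upper h))) = true) := by
                  rw [haf2]; simp
                simp only [pvTier, hE, hS, hK2, if_neg hg1, if_pos hg2, pvInnerA, if_neg hp]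
                rw [if_neg hsub, if_neg hk1, if_neg hk2]
                rw [ih]
                simp only [pvTier, if_neg hg1, if_pos hg2]
            · -- p in neither group: tier 3 yields none on both sides
              have hk1 : ¬ ((decide (p ∈ pvGroup1) && pvKws1.any (fun k => PySem.Str.isIn k (PySem.Str.upper h))) = true) := by
                simp [hg1]
              have hk2 : ¬ ((decide (p ∈ pvGroup2) && pvKws2.any (fun k => PySem.Str.isIn k (PySem.Str.upper h))) = true) := by
                simp [hg2]
              simp only [pvTier, hE, hS, if_neg hg1, if_neg hg2, pvInnerA, if_neg hp]
              rw [if_neg hsub, if_neg hk1, if_neg hk2]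
              rw [ih]
              simp only [pvTier, if_neg hg1, if_neg hg2]
        · -- group-1 keywords do not match this header
          have haf1 : (pvKws1.any (fun k => PySem.Str.isIn k (PySem.Str.upper h))) = false := by
            rw [← Bool.not_eq_true]; exact hany1
          have hK1 : pvTK1 p (h :: t) = pvTK1 p t := by
            simp only [pvTK1, List.find?_cons, haf1]
          have hk1 : ¬ ((decide (p ∈ pvGroup1) && pvKws1.any (fun k => PySem.Str.isIn k (PySem.Str.upper h))) = true) := by
            rw [haf1]; simp
          by_cases hany2 : (pvKws2.any (fun k => PySem.Str.isIn k (PySem.Str.upper h))) = true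
          · by_cases hg2 : p ∈ pvGroup2
            · have hg1 : ¬ p ∈ pvGroup1 := fun h1 => pv_not_both p h1 hg2
              have hK2 : pvTK2 p (h :: t) = some h := by
                simp only [pvTK2, List.find?_cons, hany2]
              have hk2 : (decide (p ∈ pvGroup2) && pvKws2.any (fun k => PySem.Str.isIn k (PySem.Str.upper h))) = true := by
                rw [hany2]; simp [hg2]
              simp only [pvTier, hE, hS, hK2, if_neg hg1, if_pos hg2, pvInnerA, if_neg hp]
              rw [if_neg hsub, if_neg hk1, if_pos hk2,
                if_pos (show (60 : Int) > ((none : Option String), (0 : Int)).2 by norm_num)]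
              rw [pv_run60]
              cases hE2 : pvTE p t <;> cases hS2 : pvTS p t <;> rfl
            · have hk2 : ¬ ((decide (p ∈ pvGroup2) && pvKws2.any (fun k => PySem.Str.isIn k (PySem.Str.upper h))) = true) := by
                simp [hg2]
              simp only [pvInnerA, if_neg hp]
              rw [if_neg hsub, if_neg hk1, if_neg hk2]
              rw [ih]
              by_cases hg1 : p ∈ pvGroup1
              · simp only [pvTier, hE, hS, hK1, if_pos hg1]
              · simp only [pvTier, hE, hS, if_neg hg1, if_neg hg2]
          · have haf2 : (pvKws2.any (fun k => PySem.Str.isIn k (PySem.Str.upper h))) = false := by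
              rw [← Bool.not_eq_true]; exact hany2
            have hK2 : pvTK2 p (h :: t) = pvTK2 p t := by
              simp only [pvTK2, List.find?_cons, haf2]
            have hk2 : ¬ ((decide (p ∈ pvGroup2) && pvKws2.any (fun k => PySem.Str.isIn k (PySem.Str.upper h))) = true) := by
              rw [haf2]; simp
            simp only [pvInnerA, if_neg hp]
            rw [if_neg hsub, if_neg hk1, if_neg hk2]
            rw [ih]
            by_cases hg1 : p ∈ pvGroup1
            · simp only [pvTier, hE, hS, hK1, if_pos hg1]
            · by_cases hg2 : p ∈ pvGroup2
              · simp only [pvTier, hE, hS, hK2, if_neg hg1, if_pos hg2]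
              · simp only [pvTier, hE, hS, if_neg hg1, if_neg hg2]

-- ===== VERDICT (by name: the statement is the Claim_ definition above) =====
theorem suggest_mappings_spec : Claim_equal_suggest_mappings := by
  intro ps hs _
  unfold Spec_suggest_mappings suggest_mappings suggest_mappings_alt
  have hf : ∀ (d : PySem.Dict String String) (ph : String),
      (fun (suggestions : PySem.Dict String String) placeholder =>
        let p := PySem.Str.upper (PySem.Str.stripChars placeholder "{}")
        let st := pvInnerA p (none, 0) hs
        match st.1 with
        | some m => if m ≠ "" then suggestions.insert p m else suggestions
        | none => suggestions) d ph
      = (fun (suggestions : PySem.Dict String String) placeholder =>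
        let p := PySem.Str.upper (PySem.Str.stripChars placeholder "{}")
        match pvAltFind p (hs.map PySem.Str.upper) with
        | some m => if m ≠ "" then suggestions.insert p m else suggestions
        | none => suggestions) d ph := by
    intro d ph
    simp only [pv_key, pv_alt_eq]
  rw [funext fun d => funext fun ph => hf d ph]
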